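-- pv_equiv track=rewrite | github.com/ai-resilience/vlm_jailbreak_cilab | scripts/utils/create_images_from_csv.py | split_instruction_into_4_parts
-- ===== SOURCE A (Python) =====
-- def split_instruction_into_4_parts(instruction: str) -> list:
--     """
--     Split instruction text into 4 parts for 2x2 tiled image.
--
--     Strategy:
--     1. All words distributed evenly across 4 tiles
--
--     Args:
--         instruction: Instruction text to split
--
--     Returns:
--         List of 4 text strings
--     """
--     # Remove leading/trailing whitespace and periods
--     instruction = instruction.strip().rstrip('.')
--
--     # Split into words
--     words = instruction.split()
--
--     if len(words) == 0:
--         return ["", "", "", ""]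
--
--     # Distribute all words evenly across 4 tiles
--     total_words = len(words)
--     words_per_tile = total_words // 4
--     remainder = total_words % 4
--
--     parts = []
--     start_idx = 0
--
--     for i in range(4):
--         # Distribute remainder words to first tiles
--         part_size = words_per_tile + (1 if i < remainder else 0)
--         end_idx = start_idx + part_size
--
--         part_words = words[start_idx:end_idx]
--         # Join words with space (horizontal layout)
--         part_text = " ".join(part_words) if part_words else ""
--
--         # Add part text to parts list
--         parts.append(part_text)
--
--         start_idx = end_idx
--
--     return parts
-- ===== SOURCE B (Python) =====
-- def split_instruction_into_4_parts(instruction: str) -> list: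
--     """Split instruction text into 4 parts by recursive greedy fair splitting:
--     with k tiles left, the next tile takes ceil(remaining/k) words.
--     This yields the even distribution (extra words on the first tiles)
--     without precomputing quotient/remainder or threading a cursor index."""
--     def go(words, k):
--         if k == 0:
--             return []
--         c = -(-len(words) // k)  # ceil(len(words) / k)
--         return [" ".join(words[:c])] + go(words[c:], k - 1)
--     return go(instruction.strip().rstrip('.').split(), 4)
-- ===== Notes on version B (the rewrite author's own statement) =====
-- stated objective: alternative
-- what changed: Replaces A's precomputed quotient/remainder and threaded start_idx cursor over 4 tiles (with an explicit empty-input guard and per-part empty check) by a recursive greedy split that, with k tiles remaining, gives the next tile ceil(remaining/k) words and recurses on the rest.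
import Mathlib
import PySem

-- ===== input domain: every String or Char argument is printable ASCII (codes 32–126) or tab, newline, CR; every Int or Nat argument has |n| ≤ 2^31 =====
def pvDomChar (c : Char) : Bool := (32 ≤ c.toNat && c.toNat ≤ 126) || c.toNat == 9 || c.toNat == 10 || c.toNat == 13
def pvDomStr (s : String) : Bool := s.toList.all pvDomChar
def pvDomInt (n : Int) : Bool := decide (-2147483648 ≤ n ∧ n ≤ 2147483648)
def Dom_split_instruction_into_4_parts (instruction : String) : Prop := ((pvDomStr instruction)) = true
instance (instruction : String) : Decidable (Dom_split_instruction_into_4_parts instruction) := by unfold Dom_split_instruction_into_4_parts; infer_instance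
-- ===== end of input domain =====

-- B replaces A's quotient/remainder bookkeeping and threaded start_idx cursor by a
-- recursive greedy split: with k tiles left, the next tile takes ceil(remaining/k)
-- words; objective: alternative (same O(n) cost, different decomposition).

-- str.rstrip('.'): drop trailing '.' characters — exact hand port (reverse / dropWhile / reverse)
def pyRstripDot (s : String) : String :=
  String.mk ((s.toList.reverse.dropWhile (fun c => c == '.')).reverse)

-- ===== PORT A =====
def split_instruction_into_4_parts (instruction : String) : List String :=
  let instruction := pyRstripDot (PySem.Str.strip instruction)
  let words := PySem.Str.split₀ instruction
  if words.length = 0 then ["", "", "", ""]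
  else
    let total_words : Int := words.length
    let words_per_tile := PySem.Int.floordiv total_words 4
    let remainder := PySem.Int.mod total_words 4
    let st := (PySem.List.pyRange 0 4 1).foldl
      (fun (st : List String × Int) i =>
        let part_size := words_per_tile + (if i < remainder then (1 : Int) else 0)
        let end_idx := st.2 + part_size
        let part_words := PySem.List.slice words (some st.2) (some end_idx)
        let part_text := if part_words ≠ [] then PySem.Str.join " " part_words else ""
        (st.1 ++ [part_text], end_idx))
      ([], 0)
    st.1

-- ===== PORT B =====
-- helper go(words, k): k tiles left; the first takes ceil(len(words)/k) = -(-len // k) words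
def goSplit : List String → Nat → List String
  | _, 0 => []
  | words, k+1 =>
    let c : Int := -(PySem.Int.floordiv (-(words.length : Int)) ((k : Int) + 1))
    PySem.Str.join " " (PySem.List.slice words none (some c))
      :: goSplit (PySem.List.slice words (some c) none) k

def split_instruction_into_4_parts_alt (instruction : String) : List String :=
  goSplit (PySem.Str.split₀ (pyRstripDot (PySem.Str.strip instruction))) 4

-- ===== PRECONDITION & SPEC =====
def Spec_split_instruction_into_4_parts (instruction : String) (out : List String) : Prop := out = split_instruction_into_4_parts_alt instruction
instance (instruction : String) (out : List String) : Decidable (Spec_split_instruction_into_4_parts instruction out) := by unfold Spec_split_instruction_into_4_parts; infer_instance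

-- ===== CLAIM (what is proved, stated in full; the proofs are below) =====
def Claim_equal_split_instruction_into_4_parts : Prop := ∀ (instruction : String), Dom_split_instruction_into_4_parts instruction → Spec_split_instruction_into_4_parts instruction (split_instruction_into_4_parts instruction)

-- ===== LEMMAS AND PROOFS =====

theorem join_if_ne (pw : List String) :
    (if pw ≠ [] then PySem.Str.join " " pw else "") = PySem.Str.join " " pw := by
  cases pw <;> simp [PySem.Str.join]

-- A's fold over range(4) with a running cursor equals the closed-form slice map
theorem core_eq (ws : List String) :
    (if ws.length = 0 then ["", "", "", ""]
     else
      let total_words : Int := ws.length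
      let words_per_tile := PySem.Int.floordiv total_words 4
      let remainder := PySem.Int.mod total_words 4
      ((PySem.List.pyRange 0 4 1).foldl
        (fun (st : List String × Int) i =>
          let part_size := words_per_tile + (if i < remainder then (1 : Int) else 0)
          let end_idx := st.2 + part_size
          let part_words := PySem.List.slice ws (some st.2) (some end_idx)
          let part_text := if part_words ≠ [] then PySem.Str.join " " part_words else ""
          (st.1 ++ [part_text], end_idx))
        ([], 0)).1)
    = (PySem.List.pyRange 0 4 1).map (fun i =>
        PySem.Str.join " " (PySem.List.slice ws
          (some (i * PySem.Int.floordiv (ws.length : Int) 4 + min i (PySem.Int.mod (ws.length : Int) 4)))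
          (some ((i + 1) * PySem.Int.floordiv (ws.length : Int) 4 + min (i + 1) (PySem.Int.mod (ws.length : Int) 4))))) := by
  have h4 : PySem.List.pyRange 0 4 1 = [0, 1, 2, 3] := by decide
  by_cases h : ws.length = 0
  · obtain rfl : ws = [] := List.length_eq_zero_iff.mp h
    decide
  · simp only [if_neg h, h4,
      PySem.Int.floordiv_eq_ediv_of_pos (b := 4) (by norm_num),
      PySem.Int.mod_eq_emod_of_pos (b := 4) (by norm_num),
      List.foldl, List.map, join_if_ne, List.nil_append,
      List.cons_append]
    have key : ∀ a b c d : Int, a = b → c = d →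
        PySem.List.slice ws (some a) (some c) = PySem.List.slice ws (some b) (some d) := by
      rintro a b c d rfl rfl; rfl
    refine congrArg₂ _ (congrArg _ (key _ _ _ _ (by omega) (by omega)))
      (congrArg₂ _ (congrArg _ (key _ _ _ _ (by omega) (by omega)))
      (congrArg₂ _ (congrArg _ (key _ _ _ _ (by omega) (by omega)))
      (congrArg₂ _ (congrArg _ (key _ _ _ _ (by omega) (by omega))) rfl)))

-- a slice with Int bounds that are Nat casts is a drop/take
theorem sliceCast {α : Type} (ws : List α) (a b : Int) (a' b' : Nat) (ha : a = a') (hb : b = b') :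
    PySem.List.slice ws (some a) (some b) = (ws.drop a').take (b' - a') := by
  subst ha hb; exact PySem.List.slice_natCast ws a' b'

-- the closed-form slice map equals B's greedy ceiling recursion
theorem map_eq_goSplit (ws : List String) :
    (PySem.List.pyRange 0 4 1).map (fun i =>
        PySem.Str.join " " (PySem.List.slice ws
          (some (i * PySem.Int.floordiv (ws.length : Int) 4 + min i (PySem.Int.mod (ws.length : Int) 4)))
          (some ((i + 1) * PySem.Int.floordiv (ws.length : Int) 4 + min (i + 1) (PySem.Int.mod (ws.length : Int) 4)))))
      = goSplit ws 4 := by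
  have h4 : PySem.List.pyRange 0 4 1 = [0,1,2,3] := by decide
  rw [h4]
  simp only [goSplit]
  norm_num
  rw [show (-(-(ws.length:Int) / 4)) = (((ws.length+3)/4 : Nat) : Int) by omega]
  rw [PySem.List.slice_from_natCast, PySem.List.slice_to_natCast]
  simp only [List.length_drop]
  rw [show (-(-((ws.length - (ws.length+3)/4 : Nat) : Int) / 3)) = (((ws.length - (ws.length+3)/4 + 2)/3 : Nat) : Int) by omega]
  rw [PySem.List.slice_from_natCast, PySem.List.slice_to_natCast]
  simp only [List.length_drop]
  rw [show (-(-((ws.length - (ws.length+3)/4 - (ws.length - (ws.length+3)/4 + 2)/3 : Nat) : Int) / 2))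
        = (((ws.length - (ws.length+3)/4 - (ws.length - (ws.length+3)/4 + 2)/3 + 1)/2 : Nat) : Int) by omega]
  rw [PySem.List.slice_from_natCast, PySem.List.slice_to_natCast]
  obtain ⟨q, r, hn, hr4⟩ : ∃ q r, ws.length = 4*q+r ∧ r < 4 := ⟨ws.length/4, ws.length%4, by omega, by omega⟩
  refine ⟨?_, ?_, ?_, ?_⟩
  · rw [sliceCast ws _ _ 0 ((ws.length+3)/4) (by interval_cases r <;> omega) (by interval_cases r <;> omega)]
    simp
  · rw [sliceCast ws _ _ ((ws.length+3)/4) (((ws.length+3)/4)+((ws.length - ((ws.length+3)/4) + 2)/3)) (by interval_cases r <;> omega) (by interval_cases r <;> omega),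
        show ((ws.length+3)/4) + ((ws.length - ((ws.length+3)/4) + 2)/3) - ((ws.length+3)/4) = ((ws.length - ((ws.length+3)/4) + 2)/3) by omega]
  · rw [sliceCast ws _ _ (((ws.length+3)/4)+((ws.length - ((ws.length+3)/4) + 2)/3)) (((ws.length+3)/4)+((ws.length - ((ws.length+3)/4) + 2)/3)+((ws.length - ((ws.length+3)/4) - ((ws.length - ((ws.length+3)/4) + 2)/3) + 1)/2)) (by interval_cases r <;> omega) (by interval_cases r <;> omega),
        show ((ws.length+3)/4) + ((ws.length - ((ws.length+3)/4) + 2)/3) + ((ws.length - ((ws.length+3)/4) - ((ws.length - ((ws.length+3)/4) + 2)/3) + 1)/2) - (((ws.length+3)/4)+((ws.length - ((ws.length+3)/4) + 2)/3)) = ((ws.length - ((ws.length+3)/4) - ((ws.length - ((ws.length+3)/4) + 2)/3) + 1)/2) by omega]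
    simp only [List.drop_drop]
  · rw [sliceCast ws _ _ (((ws.length+3)/4)+((ws.length - ((ws.length+3)/4) + 2)/3)+((ws.length - ((ws.length+3)/4) - ((ws.length - ((ws.length+3)/4) + 2)/3) + 1)/2)) ws.length (by interval_cases r <;> omega) (by interval_cases r <;> omega)]
    rw [List.take_of_length_le (by simp)]
    simp only [List.drop_drop]

-- ===== VERDICT (by name: the statement is the Claim_ definition above) =====
theorem split_instruction_into_4_parts_spec : Claim_equal_split_instruction_into_4_parts := by
  intro instruction _
  unfold Spec_split_instruction_into_4_parts split_instruction_into_4_parts split_instruction_into_4_parts_alt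
  exact (core_eq _).trans (map_eq_goSplit _)
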